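-- pv_equiv track=rewrite | github.com/hyeonjun/AlgorithmTest | Algorithm_Study/Algorithm_Type/Arrangement_CompleteSearch_BlackJack.py | solution
-- ===== SOURCE A (Python) =====
-- def solution(N, M, Card):
--     answer = 0
--     for i in range(N):
--         for j in range(i+1, N):
--             for k in range(j+1, N):
--                 tmp = Card[i]+Card[j]+Card[k]
--                 if tmp <= M:
--                     answer = max(answer, tmp)
--     return answer
--     pass
-- ===== SOURCE B (Python) =====
-- def solution(N, M, Card):
--     cards = sorted(Card[:max(N, 0)])
--     n = len(cards)
--     best = 0
--     for i in range(n - 2):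
--         ci = cards[i]
--         need = M - ci
--         lo, hi = i + 1, n - 1
--         while lo < hi:
--             s = cards[lo] + cards[hi]
--             if s <= need:
--                 if ci + s > best:
--                     best = ci + s
--                 lo += 1
--             else:
--                 hi -= 1
--     return best
-- ===== Notes on version B (the rewrite author's own statement) =====
-- stated objective: faster
-- what changed: Replaces the O(N^3) triple nested loop with sort-then-two-pointer: sort the first N cards, fix the smallest card of each triple, and sweep the best pair with two pointers, for O(N^2) total.
import Mathlib
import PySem

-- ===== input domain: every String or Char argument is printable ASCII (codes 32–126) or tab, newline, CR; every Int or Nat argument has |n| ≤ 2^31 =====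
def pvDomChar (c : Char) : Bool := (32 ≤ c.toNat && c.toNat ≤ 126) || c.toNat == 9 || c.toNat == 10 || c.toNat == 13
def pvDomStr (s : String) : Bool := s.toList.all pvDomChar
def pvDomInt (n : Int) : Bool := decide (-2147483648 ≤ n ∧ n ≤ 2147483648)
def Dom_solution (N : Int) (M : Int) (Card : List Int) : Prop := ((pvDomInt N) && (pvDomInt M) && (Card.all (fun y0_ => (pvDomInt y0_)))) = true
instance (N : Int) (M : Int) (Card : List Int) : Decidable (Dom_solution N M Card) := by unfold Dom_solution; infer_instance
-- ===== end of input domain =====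

-- B replaces A's O(N^3) triple loop by sort + fix-smallest-card + two-pointer pair sweep (O(N^2)); return values agree on Pre_.

-- ===== PORT A =====
def solution (N : Int) (M : Int) (Card : List Int) : Int :=
  (PySem.List.pyRange 0 N 1).foldl (fun answer i =>
    (PySem.List.pyRange (i + 1) N 1).foldl (fun answer j =>
      (PySem.List.pyRange (j + 1) N 1).foldl (fun answer k =>
        if PySem.List.pyGetD Card i 0 + PySem.List.pyGetD Card j 0 + PySem.List.pyGetD Card k 0 ≤ M
        then max answer (PySem.List.pyGetD Card i 0 + PySem.List.pyGetD Card j 0 + PySem.List.pyGetD Card k 0)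
        else answer) answer) answer) 0

-- ===== PORT B =====
-- the 'while lo < hi' two-pointer sweep of Source B
def solAltTwoPtr (cards : List Int) (need ci : Int) (lo hi : Nat) (best : Int) : Int :=
  if _h : lo < hi then
    if cards.getD lo 0 + cards.getD hi 0 ≤ need then
      solAltTwoPtr cards need ci (lo + 1) hi (max best (ci + (cards.getD lo 0 + cards.getD hi 0)))
    else
      solAltTwoPtr cards need ci lo (hi - 1) best
  else best
termination_by hi - lo
decreasing_by all_goals omega

def solution_alt (N : Int) (M : Int) (Card : List Int) : Int :=
  let cards := PySem.List.sorted (PySem.List.slice Card none (some (max N 0))) (fun x => x) false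
  let n := cards.length
  (List.range (n - 2)).foldl (fun best i =>
    solAltTwoPtr cards (M - cards.getD i 0) (cards.getD i 0) (i + 1) (n - 1) best) 0

-- ===== PRECONDITION & SPEC =====
-- Pre_ excludes exactly the inputs where A raises IndexError: N ≥ 3 with fewer than N cards
-- (for N ≤ 2 no triple exists and A never indexes, so it returns 0 there).
def Pre_solution (N : Int) (M : Int) (Card : List Int) : Prop := N ≤ (Card.length : Int) ∨ N ≤ 2
instance (N : Int) (M : Int) (Card : List Int) : Decidable (Pre_solution N M Card) := by unfold Pre_solution; infer_instance
def pvWitness_solution : Int × Int × List Int := (4, 10, [5, 3, 7, 1])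
def Spec_solution (N : Int) (M : Int) (Card : List Int) (out : Int) : Prop := out = solution_alt N M Card
instance (N : Int) (M : Int) (Card : List Int) (out : Int) : Decidable (Spec_solution N M Card out) := by unfold Spec_solution; infer_instance

-- ===== CLAIM (what is proved, stated in full; the proofs are below) =====
def Claim_equal_solution : Prop := ∀ (N : Int) (M : Int) (Card : List Int), Dom_solution N M Card → Pre_solution N M Card → Spec_solution N M Card (solution N M Card)

-- ===== LEMMAS AND PROOFS =====

-- s is the sum of some 3 cards of xs (3-element sub-multiset)
def IsTri (xs : List Int) (s : Int) : Prop :=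
  ∃ t : List Int, t.Subperm xs ∧ t.length = 3 ∧ t.sum = s

-- loop invariant shared by A's nested loops and B's two-pointer sweep:
-- r is the running maximum of the start value a and the candidate values S that are ≤ M
def Prog (M : Int) (S : Int → Prop) (a r : Int) : Prop :=
  a ≤ r ∧ (r = a ∨ (r ≤ M ∧ S r)) ∧ ∀ s, S s → s ≤ M → s ≤ r

-- the full characterisation of both results
def GoodR (M : Int) (xs : List Int) (r : Int) : Prop :=
  0 ≤ r ∧ (r = 0 ∨ (r ≤ M ∧ IsTri xs r)) ∧ ∀ s, IsTri xs s → s ≤ M → s ≤ r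

theorem goodR_unique {M : Int} {xs : List Int} {r1 r2 : Int}
    (h1 : GoodR M xs r1) (h2 : GoodR M xs r2) : r1 = r2 := by
  obtain ⟨h10, h1b, h1c⟩ := h1
  obtain ⟨h20, h2b, h2c⟩ := h2
  rcases h1b with rfl | ⟨h1m, h1t⟩ <;> rcases h2b with rfl | ⟨h2m, h2t⟩
  · rfl
  · have := h1c r2 h2t h2m; omega
  · have := h2c r1 h1t h1m; omega
  · have := h1c r2 h2t h2m; have := h2c r1 h1t h1m; omega

theorem isTri_perm {xs ys : List Int} (h : xs.Perm ys) {s : Int} :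
    IsTri xs s → IsTri ys s := by
  rintro ⟨t, hsub, hlen, hsum⟩
  exact ⟨t, hsub.trans h.subperm, hlen, hsum⟩

theorem goodR_perm {M : Int} {xs ys : List Int} (h : xs.Perm ys) {r : Int}
    (hg : GoodR M xs r) : GoodR M ys r := by
  obtain ⟨h0, hb, hc⟩ := hg
  refine ⟨h0, ?_, fun s hs hm => hc s (isTri_perm h.symm hs) hm⟩
  rcases hb with rfl | ⟨hm, ht⟩
  · exact Or.inl rfl
  · exact Or.inr ⟨hm, isTri_perm h ht⟩

theorem prog_foldl {ι : Type} (M : Int) (Q : ι → Int → Prop) (step : Int → ι → Int)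
    (l : List ι) (hstep : ∀ a x, x ∈ l → Prog M (Q x) a (step a x)) (a : Int) :
    Prog M (fun s => ∃ x ∈ l, Q x s) a (l.foldl step a) := by
  induction l generalizing a with
  | nil => exact ⟨le_refl _, Or.inl rfl, by simp⟩
  | cons x l ih =>
    obtain ⟨h1a, h1b, h1c⟩ := hstep a x (by simp)
    obtain ⟨h2a, h2b, h2c⟩ := ih (fun a' y hy => hstep a' y (by simp [hy])) (step a x)
    simp only [List.foldl_cons]
    refine ⟨le_trans h1a h2a, ?_, ?_⟩
    · rcases h2b with h2b | ⟨hm, y, hy, hq⟩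
      · rw [h2b]
        rcases h1b with h1b | ⟨hm, hq⟩
        · exact Or.inl h1b
        · exact Or.inr ⟨hm, x, by simp, hq⟩
      · exact Or.inr ⟨hm, y, by simp [hy], hq⟩
    · rintro s ⟨y, hy, hq⟩ hsM
      rcases List.mem_cons.mp hy with rfl | hy'
      · exact le_trans (h1c s hq hsM) h2a
      · exact h2c s ⟨y, hy', hq⟩ hsM

theorem prog_body (M a tmp : Int) :
    Prog M (fun s => s = tmp) a (if tmp ≤ M then max a tmp else a) := by
  split_ifs with h
  · refine ⟨le_max_left _ _, ?_, ?_⟩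
    · rcases le_total tmp a with h' | h'
      · exact Or.inl (max_eq_left h')
      · exact Or.inr ⟨by rw [max_eq_right h']; exact h, by rw [max_eq_right h']⟩
    · rintro s rfl _; exact le_max_right _ _
  · exact ⟨le_refl _, Or.inl rfl, by rintro s rfl h'; exact absurd h' h⟩

-- increasing positions pick a sublist
theorem pair_sublist : ∀ (xs : List Int) (i j : Nat), i < j → j < xs.length →
    List.Sublist [xs.getD i 0, xs.getD j 0] xs := by
  intro xs
  induction xs with
  | nil => intro i j _ hj; simp at hj
  | cons x xs ih =>
    intro i j hij hj
    cases i with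
    | zero =>
      cases j with
      | zero => omega
      | succ j' =>
        simp only [List.getD_cons_zero, List.getD_cons_succ]
        refine List.Sublist.cons₂ x (List.singleton_sublist.mpr ?_)
        have hj' : j' < xs.length := by simpa using hj
        rw [List.getD_eq_getElem xs 0 hj']
        exact List.getElem_mem hj'
    | succ i' =>
      cases j with
      | zero => omega
      | succ j' =>
        simp only [List.getD_cons_succ]
        exact List.Sublist.cons x (ih i' j' (by omega) (by simpa using hj))

theorem tri_sublist : ∀ (xs : List Int) (i j k : Nat), i < j → j < k → k < xs.length →
    List.Sublist [xs.getD i 0, xs.getD j 0, xs.getD k 0] xs := by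
  intro xs
  induction xs with
  | nil => intro i j k _ _ hk; simp at hk
  | cons x xs ih =>
    intro i j k hij hjk hk
    cases i with
    | zero =>
      cases j with
      | zero => omega
      | succ j' =>
        cases k with
        | zero => omega
        | succ k' =>
          simp only [List.getD_cons_zero, List.getD_cons_succ]
          exact List.Sublist.cons₂ x (pair_sublist xs j' k' (by omega) (by simpa using hk))
    | succ i' =>
      cases j with
      | zero => omega
      | succ j' =>
        cases k with
        | zero => omega
        | succ k' =>
          simp only [List.getD_cons_succ]
          exact List.Sublist.cons x (ih i' j' k' (by omega) (by omega) (by simpa using hk))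

-- a 2-element sublist sits at increasing positions
theorem sublist_pair_idx : ∀ (ys : List Int) (b c : Int), List.Sublist [b, c] ys →
    ∃ j k : Nat, j < k ∧ k < ys.length ∧ ys.getD j 0 = b ∧ ys.getD k 0 = c := by
  intro ys
  induction ys with
  | nil => intro b c h; simp at h
  | cons y ys ih =>
    intro b c h
    cases h with
    | cons _ h' =>
      obtain ⟨j, k, hjk, hk, hb, hc⟩ := ih b c h'
      exact ⟨j + 1, k + 1, by omega, by simpa using hk, by simpa using hb, by simpa using hc⟩
    | cons₂ _ h' =>
      have hc : c ∈ ys := List.singleton_sublist.mp h'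
      obtain ⟨k, hk, hck⟩ := List.mem_iff_getElem.mp hc
      exact ⟨0, k + 1, by omega, by simpa using hk,
        by simp, by rw [List.getD_cons_succ, List.getD_eq_getElem ys 0 hk]; exact hck⟩

theorem sublist_tri_idx : ∀ (ys : List Int) (a b c : Int), List.Sublist [a, b, c] ys →
    ∃ i j k : Nat, i < j ∧ j < k ∧ k < ys.length ∧
      ys.getD i 0 = a ∧ ys.getD j 0 = b ∧ ys.getD k 0 = c := by
  intro ys
  induction ys with
  | nil => intro a b c h; simp at h
  | cons y ys ih =>
    intro a b c h
    cases h with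
    | cons _ h' =>
      obtain ⟨i, j, k, hij, hjk, hk, ha, hb, hc⟩ := ih a b c h'
      exact ⟨i + 1, j + 1, k + 1, by omega, by omega, by simpa using hk,
        by simpa using ha, by simpa using hb, by simpa using hc⟩
    | cons₂ _ h' =>
      obtain ⟨j, k, hjk, hk, hb, hc⟩ := sublist_pair_idx ys b c h'
      exact ⟨0, j + 1, k + 1, by omega, by omega, by simpa using hk,
        by simp, by simpa using hb, by simpa using hc⟩

theorem isTri_of_idx {xs : List Int} {i j k : Nat} (hij : i < j) (hjk : j < k)
    (hk : k < xs.length) : IsTri xs (xs.getD i 0 + xs.getD j 0 + xs.getD k 0) :=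
  ⟨[xs.getD i 0, xs.getD j 0, xs.getD k 0],
    (tri_sublist xs i j k hij hjk hk).subperm, rfl, by simp; ring⟩

theorem isTri_elim {xs : List Int} {s : Int} (h : IsTri xs s) :
    ∃ i j k : Nat, i < j ∧ j < k ∧ k < xs.length ∧
      s = xs.getD i 0 + xs.getD j 0 + xs.getD k 0 := by
  obtain ⟨t, ⟨t', hperm, hsl⟩, hlen, hsum⟩ := h
  have hlen' : t'.length = 3 := by rw [hperm.length_eq, hlen]
  obtain ⟨a, b, c, rfl⟩ := List.length_eq_three.mp hlen'
  obtain ⟨i, j, k, hij, hjk, hk, ha, hb, hc⟩ := sublist_tri_idx xs a b c hsl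
  refine ⟨i, j, k, hij, hjk, hk, ?_⟩
  have : a + b + c = s := by
    have := hperm.sum_eq; simp at this; rw [← hsum, ← this]; ring
  rw [ha, hb, hc, this]

-- ===== A side =====

theorem getD_take_eq (Card : List Int) (N i : Int) (hi0 : 0 ≤ i) (hiN : i < N)
    (hN : N ≤ (Card.length : Int)) :
    PySem.List.pyGetD Card i 0 = (Card.take N.toNat).getD i.toNat 0 := by
  have hil : i < (Card.length : Int) := lt_of_lt_of_le hiN hN
  have hiP : i.toNat < (Card.take N.toNat).length := by
    simp only [List.length_take]; omega
  rw [PySem.List.pyGetD_eq_getElem Card 0 hi0 hil, List.getD_eq_getElem _ _ hiP,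
    List.getElem_take]

theorem S0_iff (N : Int) (Card : List Int) (h0 : 0 ≤ N) (hN : N ≤ (Card.length : Int)) (s : Int) :
    (∃ i ∈ PySem.List.pyRange 0 N 1, ∃ j ∈ PySem.List.pyRange (i + 1) N 1,
      ∃ k ∈ PySem.List.pyRange (j + 1) N 1,
        s = PySem.List.pyGetD Card i 0 + PySem.List.pyGetD Card j 0 + PySem.List.pyGetD Card k 0)
    ↔ IsTri (Card.take N.toNat) s := by
  constructor
  · rintro ⟨i, hi, j, hj, k, hk, rfl⟩
    rw [PySem.List.mem_pyRange_one] at hi hj hk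
    rw [getD_take_eq Card N i (by omega) (by omega) hN,
      getD_take_eq Card N j (by omega) (by omega) hN,
      getD_take_eq Card N k (by omega) (by omega) hN]
    exact isTri_of_idx (by omega) (by omega) (by simp only [List.length_take]; omega)
  · intro h
    obtain ⟨i, j, k, hij, hjk, hk, rfl⟩ := isTri_elim h
    have hkN : (k : Int) < N := by
      simp only [List.length_take] at hk; omega
    refine ⟨(i : Int), ?_, (j : Int), ?_, (k : Int), ?_, ?_⟩
    · rw [PySem.List.mem_pyRange_one]; omega
    · rw [PySem.List.mem_pyRange_one]; omega
    · rw [PySem.List.mem_pyRange_one]; omega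
    · rw [getD_take_eq Card N (i : Int) (by omega) (by omega) hN,
        getD_take_eq Card N (j : Int) (by omega) (by omega) hN,
        getD_take_eq Card N (k : Int) (by omega) (by omega) hN]
      simp

-- A's nested loops satisfy the running-max invariant (no precondition needed)
theorem prog_A (N M : Int) (Card : List Int) :
    Prog M (fun s => ∃ i ∈ PySem.List.pyRange 0 N 1,
      ∃ j ∈ PySem.List.pyRange (i + 1) N 1, ∃ k ∈ PySem.List.pyRange (j + 1) N 1,
        s = PySem.List.pyGetD Card i 0 + PySem.List.pyGetD Card j 0 + PySem.List.pyGetD Card k 0)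
      0 (solution N M Card) := by
  unfold solution
  refine prog_foldl M _ _ _ (fun a i _ => ?_) 0
  refine prog_foldl M _ _ _ (fun a' j _ => ?_) a
  refine prog_foldl M _ _ _ (fun a'' k _ => ?_) a'
  exact prog_body M a'' _

theorem good_A (N M : Int) (Card : List Int) (h0 : 0 ≤ N) (hN : N ≤ (Card.length : Int)) :
    GoodR M (Card.take N.toNat) (solution N M Card) := by
  obtain ⟨p1, p2, p3⟩ := prog_A N M Card
  refine ⟨p1, ?_, ?_⟩
  · rcases p2 with p2 | ⟨pm, hex⟩
    · exact Or.inl p2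
    · exact Or.inr ⟨pm, (S0_iff N Card h0 hN _).mp hex⟩
  · intro s hs hm
    exact p3 s ((S0_iff N Card h0 hN s).mpr hs) hm

-- ===== B side =====

theorem twoPtr_prog (cards : List Int) (M ci : Int)
    (hmono : ∀ p q : Nat, p ≤ q → q < cards.length → cards.getD p 0 ≤ cards.getD q 0) :
    ∀ (d lo hi : Nat) (best : Int), hi - lo = d → hi < cards.length →
    Prog M (fun s => ∃ a b : Nat, lo ≤ a ∧ a < b ∧ b ≤ hi ∧
        s = ci + cards.getD a 0 + cards.getD b 0)
      best (solAltTwoPtr cards (M - ci) ci lo hi best) := by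
  intro d
  induction d using Nat.strong_induction_on with
  | _ d ih =>
    intro lo hi best hd hhi
    rw [solAltTwoPtr]
    split_ifs with hlh hs
    · obtain ⟨p1, p2, p3⟩ := ih (hi - (lo + 1)) (by omega) (lo + 1) hi
        (max best (ci + (cards.getD lo 0 + cards.getD hi 0))) rfl hhi
      refine ⟨le_trans (le_max_left _ _) p1, ?_, ?_⟩
      · rcases p2 with p2 | ⟨pm, a, b, ha, hab, hb, hEq⟩
        · rw [p2]
          rcases le_total (ci + (cards.getD lo 0 + cards.getD hi 0)) best with h' | h'
          · exact Or.inl (max_eq_left h')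
          · refine Or.inr ⟨?_, lo, hi, le_refl _, hlh, le_refl _, ?_⟩ <;>
              rw [max_eq_right h'] <;> omega
        · exact Or.inr ⟨pm, a, b, by omega, hab, hb, hEq⟩
      · rintro s ⟨a, b, ha, hab, hb, rfl⟩ hsM
        by_cases hal : lo + 1 ≤ a
        · exact p3 _ ⟨a, b, hal, hab, hb, rfl⟩ hsM
        · have haeq : a = lo := by omega
          subst haeq
          have hmb := hmono b hi hb hhi
          exact le_trans (le_trans (by omega) (le_max_right best _)) p1
    · obtain ⟨p1, p2, p3⟩ := ih (hi - 1 - lo) (by omega) lo (hi - 1) best rfl (by omega)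
      refine ⟨p1, ?_, ?_⟩
      · rcases p2 with p2 | ⟨pm, a, b, ha, hab, hb, hEq⟩
        · exact Or.inl p2
        · exact Or.inr ⟨pm, a, b, ha, hab, by omega, hEq⟩
      · rintro s ⟨a, b, ha, hab, hb, rfl⟩ hsM
        by_cases hbl : b ≤ hi - 1
        · exact p3 _ ⟨a, b, ha, hab, hbl, rfl⟩ hsM
        · have hbeq : b = hi := by omega
          subst hbeq
          have hma := hmono lo a ha (by omega)
          omega
    · refine ⟨le_refl _, Or.inl rfl, ?_⟩
      rintro s ⟨a, b, ha, hab, hb, rfl⟩ _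
      omega

theorem good_B (N M : Int) (Card : List Int) :
    GoodR M (PySem.List.sorted (PySem.List.slice Card none (some (max N 0))) (fun x => x) false)
      (solution_alt N M Card) := by
  have hmono : ∀ p q : Nat, p ≤ q →
      q < (PySem.List.sorted (PySem.List.slice Card none (some (max N 0))) (fun x => x) false).length →
      (PySem.List.sorted (PySem.List.slice Card none (some (max N 0))) (fun x => x) false).getD p 0 ≤
      (PySem.List.sorted (PySem.List.slice Card none (some (max N 0))) (fun x => x) false).getD q 0 := by
    intro p q hpq hq
    rw [List.getD_eq_getElem _ _ (by omega), List.getD_eq_getElem _ _ hq]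
    exact PySem.List.sorted_id_getElem_mono _ hpq hq
  have hunfold : solution_alt N M Card =
      (List.range ((PySem.List.sorted (PySem.List.slice Card none (some (max N 0))) (fun x => x) false).length - 2)).foldl
        (fun best i => solAltTwoPtr
          (PySem.List.sorted (PySem.List.slice Card none (some (max N 0))) (fun x => x) false)
          (M - (PySem.List.sorted (PySem.List.slice Card none (some (max N 0))) (fun x => x) false).getD i 0)
          ((PySem.List.sorted (PySem.List.slice Card none (some (max N 0))) (fun x => x) false).getD i 0)
          (i + 1)
          ((PySem.List.sorted (PySem.List.slice Card none (some (max N 0))) (fun x => x) false).length - 1) best) 0 := rfl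
  set cards := PySem.List.sorted (PySem.List.slice Card none (some (max N 0))) (fun x => x) false with hcards
  have hprog : Prog M (fun s => ∃ i ∈ List.range (cards.length - 2), ∃ a : Nat, ∃ b : Nat,
      i + 1 ≤ a ∧ a < b ∧ b ≤ cards.length - 1 ∧
      s = cards.getD i 0 + cards.getD a 0 + cards.getD b 0) 0 (solution_alt N M Card) := by
    rw [hunfold]
    refine prog_foldl M _ _ _ (fun best i hi => ?_) 0
    have hi' : i < cards.length - 2 := List.mem_range.mp hi
    exact twoPtr_prog cards M (cards.getD i 0) hmono ((cards.length - 1) - (i + 1))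
      (i + 1) (cards.length - 1) best rfl (by omega)
  obtain ⟨p1, p2, p3⟩ := hprog
  refine ⟨p1, ?_, ?_⟩
  · rcases p2 with p2 | ⟨pm, i, hi, a, b, ha, hab, hb, hEq⟩
    · exact Or.inl p2
    · have hi' : i < cards.length - 2 := List.mem_range.mp hi
      exact Or.inr ⟨pm, hEq ▸ isTri_of_idx (by omega) (by omega) (by omega)⟩
  · intro s hs hm
    obtain ⟨i, j, k, hij, hjk, hk, rfl⟩ := isTri_elim hs
    exact p3 _ ⟨i, List.mem_range.mpr (by omega), j, k, by omega, hjk, by omega, rfl⟩ hm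

theorem A_zero_of_le_two (N M : Int) (Card : List Int) (hN2 : N ≤ 2) :
    solution N M Card = 0 := by
  obtain ⟨_, p2, _⟩ := prog_A N M Card
  rcases p2 with p2 | ⟨_, i, hi, j, hj, k, hk, _⟩
  · exact p2
  · rw [PySem.List.mem_pyRange_one] at hi hj hk
    omega

theorem B_zero_of_le_two (N M : Int) (Card : List Int)
    (h : (PySem.List.sorted (PySem.List.slice Card none (some (max N 0))) (fun x => x) false).length ≤ 2) :
    solution_alt N M Card = 0 := by
  have hz : (PySem.List.sorted (PySem.List.slice Card none (some (max N 0))) (fun x => x) false).length - 2 = 0 := by omega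
  show (List.range ((PySem.List.sorted (PySem.List.slice Card none (some (max N 0))) (fun x => x) false).length - 2)).foldl _ 0 = 0
  rw [hz, List.range_zero, List.foldl_nil]

-- ===== VERDICT (by name: the statement is the Claim_ definition above) =====
theorem solution_spec : Claim_equal_solution := by
  intro N M Card _hdom hpre
  unfold Spec_solution
  by_cases hN2 : N ≤ 2
  · have hlen : (PySem.List.sorted (PySem.List.slice Card none (some (max N 0))) (fun x => x) false).length ≤ 2 := by
      rw [PySem.List.length_sorted, PySem.List.slice_to Card (le_max_right N 0), List.length_take]
      omega
    rw [A_zero_of_le_two N M Card hN2, B_zero_of_le_two N M Card hlen]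
  · have h0 : 0 ≤ N := by omega
    have hN : N ≤ (Card.length : Int) := by
      rcases hpre with h | h
      · exact h
      · omega
    have hA := good_A N M Card h0 hN
    have hperm : (PySem.List.sorted (PySem.List.slice Card none (some (max N 0))) (fun x => x) false).Perm
        (Card.take N.toNat) := by
      have h1 := PySem.List.sorted_perm (PySem.List.slice Card none (some (max N 0))) (fun x => x) false
      have h2 : PySem.List.slice Card none (some (max N 0)) = Card.take N.toNat := by
        rw [PySem.List.slice_to Card (le_max_right N 0), max_eq_left h0]
      exact h1.trans (List.Perm.of_eq h2)
    have hB := goodR_perm hperm (good_B N M Card)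
    exact goodR_unique hA hB
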